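-- pv_equiv track=rewrite | github.com/tycyd/codeforces | implementation/1409D Decrease the Sum of Digits.py | decrease_the_sum_of_digits
-- ===== SOURCE A (Python) =====
-- def decrease_the_sum_of_digits(n, s):
--     n_s = str(n)
--     v = 0
--     ans = 0
--     for i in range(len(n_s)):
--         v += ord(n_s[i]) - ord('0')
--         if v >= s and ans == 0:
--             ans = 10**(len(n_s)-i) - int(n_s[i:])
--
--     if v == s:
--         return 0
--     else:
--         return ans
-- ===== SOURCE B (Python) =====
-- def decrease_the_sum_of_digits(n, s):
--     def dsum(m):
--         return m % 10 + dsum(m // 10) if m > 0 else 0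
--     if dsum(n) <= s:
--         return 0
--     p = 10
--     while p <= n:
--         m = (n // p + 1) * p
--         if dsum(m) <= s:
--             return m - n
--         p *= 10
--     return p - n
-- ===== Notes on version B (the rewrite author's own statement) =====
-- stated objective: alternative
-- what changed: A makes one cumulative pass over the decimal string of n, accumulating prefix digit sums and computing the answer from a string slice at the first prefix whose digit sum reaches s; B never touches strings: it computes digit sums arithmetically and enumerates candidate power-of-ten roundings m = (n//p + 1)*p for p = 10, 100, ..., returning m - n for the first candidate whose digit sum is <= s. Pre_ excludes negative n, outside the problem's natural domain, where A's ord-based loop treats the '-' sign as a digit of value -3.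
-- outside the precondition, e.g. on decrease_the_sum_of_digits(-19, 1): A returns 1, B returns 0
import Mathlib
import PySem

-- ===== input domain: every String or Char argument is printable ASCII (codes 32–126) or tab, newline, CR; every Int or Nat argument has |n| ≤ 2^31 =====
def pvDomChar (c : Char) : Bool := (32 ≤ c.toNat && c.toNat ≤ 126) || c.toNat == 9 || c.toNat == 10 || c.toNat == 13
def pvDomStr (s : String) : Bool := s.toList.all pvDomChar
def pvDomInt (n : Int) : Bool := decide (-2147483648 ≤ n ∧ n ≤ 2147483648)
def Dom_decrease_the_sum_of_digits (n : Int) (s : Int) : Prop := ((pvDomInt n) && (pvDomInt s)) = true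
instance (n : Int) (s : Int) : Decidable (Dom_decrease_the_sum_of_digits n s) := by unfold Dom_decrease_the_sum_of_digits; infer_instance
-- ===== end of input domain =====

-- B replaces A's single cumulative pass over str(n) (prefix digit sums + a string-slice int())
-- by a string-free candidate search over power-of-ten roundings with arithmetic digit sums;
-- same cost, different algorithm (objective: alternative). Return values agree on all n ≥ 0.

-- ===== PORT A =====
-- hand port of Python's int() for the only strings A feeds it: slices of str(n), i.e. digit
-- strings optionally prefixed by '-'; exact on those (PySem.Int.ofStr? is opaque to the proofs here).
def pvParseDigits (cs : List Char) : Int :=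
  match cs with
  | '-' :: ds => -(ds.foldl (fun a c => 10 * a + ((c.toNat : Int) - 48)) 0)
  | ds => ds.foldl (fun a c => 10 * a + ((c.toNat : Int) - 48)) 0

def decrease_the_sum_of_digits (n : Int) (s : Int) : Int :=
  let n_s : String := PySem.Int.toStr n                 -- n_s = str(n)
  let L : Int := PySem.Str.len n_s                      -- len(n_s)
  let r := (PySem.List.pyRange 0 L 1).foldl (fun (st : Int × Int) i =>
    -- v += ord(n_s[i]) - ord('0')   (ord(c) is the code point c.toNat; ord('0') = 48; i is in range)
    let v := st.1 + (((PySem.Str.pyGet? n_s i).getD '0').toNat : Int) - 48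
    -- if v >= s and ans == 0: ans = 10**(len(n_s)-i) - int(n_s[i:])
    let ans := if s ≤ v ∧ st.2 = 0 then
        10 ^ (L - i).toNat - pvParseDigits (PySem.Str.slice n_s (some i) none).toList
      else st.2
    (v, ans)) (0, 0)
  if r.1 = s then 0 else r.2

-- ===== PORT B =====
-- dsum(m) = m % 10 + dsum(m // 10) if m > 0 else 0
def pvDsum (m : Int) : Int :=
  if h : 0 < m then PySem.Int.mod m 10 + pvDsum (PySem.Int.floordiv m 10) else 0
termination_by m.toNat
decreasing_by
  rw [PySem.Int.floordiv_eq_ediv_of_pos (by norm_num)]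
  have h1 : m / 10 < m := Int.ediv_lt_of_lt_mul (by norm_num) (by omega)
  have h2 : 0 ≤ m / 10 := Int.ediv_nonneg (le_of_lt h) (by norm_num)
  omega

-- the while-loop of B; fuel n.toNat + 1 bounds the number of iterations (p is multiplied by 10
-- each round and the loop stops once n < p, so far fewer rounds than n+1 ever run)
def pvLoop (n s p : Int) : Nat → Int
  | 0 => p - n
  | fuel + 1 =>
    if p ≤ n then
      let m := (PySem.Int.floordiv n p + 1) * p
      if pvDsum m ≤ s then m - n else pvLoop n s (p * 10) fuel
    else p - n

def decrease_the_sum_of_digits_alt (n : Int) (s : Int) : Int :=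
  if pvDsum n ≤ s then 0 else pvLoop n s 10 (n.toNat + 1)

-- ===== PRECONDITION & SPEC =====
-- Pre_ restricts to the problem's natural domain n ≥ 0 (Codeforces 1409D: 1 ≤ n); for negative n
-- A still returns a value, but only through its ord-based loop reading '-' as the digit value -3.
def Pre_decrease_the_sum_of_digits (n : Int) (s : Int) : Prop := 0 ≤ n
instance (n : Int) (s : Int) : Decidable (Pre_decrease_the_sum_of_digits n s) := by
  unfold Pre_decrease_the_sum_of_digits; infer_instance

def pvWitness_decrease_the_sum_of_digits : Int × Int := (217, 2)

def Spec_decrease_the_sum_of_digits (n : Int) (s : Int) (out : Int) : Prop := out = decrease_the_sum_of_digits_alt n s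
instance (n : Int) (s : Int) (out : Int) : Decidable (Spec_decrease_the_sum_of_digits n s out) := by unfold Spec_decrease_the_sum_of_digits; infer_instance

-- ===== CLAIM (what is proved, stated in full; the proofs are below) =====
def Claim_equal_decrease_the_sum_of_digits : Prop := ∀ (n : Int) (s : Int), Dom_decrease_the_sum_of_digits n s → Pre_decrease_the_sum_of_digits n s → Spec_decrease_the_sum_of_digits n s (decrease_the_sum_of_digits n s)

-- ===== LEMMAS AND PROOFS =====

def pvDval (c : Char) : Int := (c.toNat : Int) - 48

def pvSds (m : Nat) : Nat :=
  if h : m = 0 then 0 else m % 10 + pvSds (m / 10)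
decreasing_by exact Nat.div_lt_self (Nat.pos_of_ne_zero h) (by norm_num)

theorem pvSds_zero : pvSds 0 = 0 := by rw [pvSds]; simp
theorem pvSds_pos (m : Nat) (h : m ≠ 0) : pvSds m = m % 10 + pvSds (m / 10) := by
  conv_lhs => rw [pvSds]
  simp [h]

theorem pvSds_ten_mul_add (a d : Nat) (hd : d < 10) : pvSds (10 * a + d) = d + pvSds a := by
  by_cases h : 10 * a + d = 0
  · have ha : a = 0 := by omega
    have hd0 : d = 0 := by omega
    simp [ha, hd0, pvSds_zero]
  · rw [pvSds_pos _ h]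
    have h1 : (10 * a + d) % 10 = d := by omega
    have h2 : (10 * a + d) / 10 = a := by omega
    rw [h1, h2]

theorem pvSds_div10_le (m : Nat) : pvSds (m / 10) ≤ pvSds m := by
  by_cases h : m = 0
  · simp [h]
  · rw [pvSds_pos m h]; omega

theorem pvSds_div_pow_le (m k : Nat) : pvSds (m / 10 ^ k) ≤ pvSds m := by
  induction k generalizing m with
  | zero => simp
  | succ k ih =>
    have : m / 10 ^ (k + 1) = (m / 10) / 10 ^ k := by
      rw [pow_succ', Nat.div_div_eq_div_mul]
    rw [this]
    exact le_trans (ih (m / 10)) (pvSds_div10_le m)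

theorem pvSds_div_le_div (m i j : Nat) (h : i ≤ j) : pvSds (m / 10 ^ j) ≤ pvSds (m / 10 ^ i) := by
  have : m / 10 ^ j = (m / 10 ^ i) / 10 ^ (j - i) := by
    rw [Nat.div_div_eq_div_mul, ← pow_add, Nat.add_sub_cancel' h]
  rw [this]; exact pvSds_div_pow_le _ _

theorem pvSds_mul_pow (a k : Nat) : pvSds (a * 10 ^ k) = pvSds a := by
  induction k generalizing a with
  | zero => simp
  | succ k ih =>
    have : a * 10 ^ (k + 1) = (a * 10) * 10 ^ k := by ring
    rw [this, ih]
    have := pvSds_ten_mul_add a 0 (by norm_num)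
    simpa [mul_comm] using this

theorem pvSds_inc (a : Nat) : ∃ t, pvSds (a + 1) = pvSds (a / 10 ^ t) + 1 ∧ a + 1 = (a / 10 ^ t + 1) * 10 ^ t := by
  induction a using Nat.strong_induction_on with
  | _ a ih =>
    by_cases h9 : a % 10 = 9
    · have ha : 0 < a := by omega
      obtain ⟨t', h1, h2⟩ := ih (a / 10) (Nat.div_lt_self ha (by norm_num))
      refine ⟨t' + 1, ?_, ?_⟩
      · have hstep : a + 1 = (a / 10 + 1) * 10 := by omega
        rw [hstep]
        have := pvSds_mul_pow (a / 10 + 1) 1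
        rw [pow_one] at this
        rw [this, h1, Nat.div_div_eq_div_mul, ← pow_succ']
      · have hstep : a + 1 = (a / 10 + 1) * 10 := by omega
        rw [hstep, h2, Nat.div_div_eq_div_mul, ← pow_succ']
        ring
    · refine ⟨0, ?_, by simp⟩
      simp only [pow_zero, Nat.div_one]
      have e1 : a + 1 = 10 * (a / 10) + (a % 10 + 1) := by omega
      have e2 : a = 10 * (a / 10) + a % 10 := by omega
      rw [e1, pvSds_ten_mul_add _ _ (by omega)]
      conv_rhs => rw [e2, pvSds_ten_mul_add _ _ (by omega)]
      omega

theorem pvSds_succ_le (a : Nat) : pvSds (a + 1) ≤ pvSds a + 1 := by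
  obtain ⟨t, h1, _⟩ := pvSds_inc a
  rw [h1]
  exact Nat.add_le_add_right (pvSds_div_pow_le a t) 1

def pvM (N k : Nat) : Nat := (N / 10 ^ k + 1) * 10 ^ k

theorem pvM_mono (N : Nat) {k k' : Nat} (h : k ≤ k') : pvM N k ≤ pvM N k' := by
  unfold pvM
  set d := 10 ^ (k' - k) with hd
  have hdpos : 0 < d := by positivity
  have hp : 10 ^ k' = d * 10 ^ k := by rw [hd, ← pow_add]; congr 1; omega
  have hdiv : N / 10 ^ k' = (N / 10 ^ k) / d := by
    rw [Nat.div_div_eq_div_mul, hp, mul_comm]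
  set a := N / 10 ^ k with hA
  have key : a + 1 ≤ (a / d + 1) * d := by
    have := Nat.div_add_mod a d
    have := Nat.mod_lt a hdpos
    nlinarith
  calc (a + 1) * 10 ^ k ≤ ((a / d + 1) * d) * 10 ^ k := by
        exact Nat.mul_le_mul_right _ key
    _ = (N / 10 ^ k' + 1) * 10 ^ k' := by rw [hdiv, hp]; ring

def pvDigits (m : Nat) : List Char :=
  if h : m < 10 then [Nat.digitChar m] else pvDigits (m / 10) ++ [Nat.digitChar (m % 10)]
decreasing_by exact Nat.div_lt_self (by omega) (by norm_num)

theorem pvDigits_lt (m : Nat) (h : m < 10) : pvDigits m = [Nat.digitChar m] := by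
  rw [pvDigits]; simp [h]

theorem pvDigits_ge (m : Nat) (h : ¬ m < 10) : pvDigits m = pvDigits (m / 10) ++ [Nat.digitChar (m % 10)] := by
  conv_lhs => rw [pvDigits]
  simp [h]

theorem pv_core_eq : ∀ (f m : Nat) (acc : List Char), m < f →
    Nat.toDigitsCore 10 f m acc = pvDigits m ++ acc := by
  intro f
  induction f with
  | zero => intro m acc h; omega
  | succ f ih =>
    intro m acc h
    simp only [Nat.toDigitsCore]
    by_cases h10 : m < 10
    · have : m / 10 = 0 := Nat.div_eq_of_lt h10
      simp [this, pvDigits_lt m h10, Nat.mod_eq_of_lt h10]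
    · have hne : ¬ m / 10 = 0 := by
        intro h0; exact h10 (by omega)
      simp only [hne, if_false]
      rw [ih (m / 10) _ (by
        have := Nat.div_lt_self (show 0 < m by omega) (show 1 < 10 by norm_num)
        omega)]
      rw [pvDigits_ge m h10, List.append_assoc]
      rfl

theorem pv_toChars (N : Nat) : PySem.Int.toChars (N : Int) = pvDigits N := by
  unfold PySem.Int.toChars
  have h1 : ¬ ((N : Int) < 0) := Int.not_lt.mpr (Int.natCast_nonneg N)
  simp only [h1, if_false, Int.toNat_natCast]
  unfold Nat.toDigits
  rw [pv_core_eq (N + 1) N [] (by omega), List.append_nil]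

theorem pv_digitChar_toNat (d : Nat) (h : d < 10) : (Nat.digitChar d).toNat = 48 + d := by
  interval_cases d <;> rfl

theorem pv_digitChar_dval (d : Nat) (h : d < 10) : pvDval (Nat.digitChar d) = (d : Int) := by
  unfold pvDval
  rw [pv_digitChar_toNat d h]
  push_cast; ring

def pvIsDigit (c : Char) : Prop := ∃ d, d < 10 ∧ c = Nat.digitChar d

theorem pvDigits_digits (m : Nat) : ∀ c ∈ pvDigits m, pvIsDigit c := by
  induction m using Nat.strong_induction_on with
  | _ m ih =>
    by_cases h : m < 10
    · rw [pvDigits_lt m h]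
      intro c hc
      simp at hc
      exact ⟨m, h, hc⟩
    · rw [pvDigits_ge m h]
      intro c hc
      rcases List.mem_append.mp hc with hc | hc
      · exact ih (m / 10) (Nat.div_lt_self (by omega) (by norm_num)) c hc
      · simp at hc
        exact ⟨m % 10, by omega, hc⟩

theorem pv_dval_bounds (c : Char) (h : pvIsDigit c) : 0 ≤ pvDval c ∧ pvDval c ≤ 9 := by
  obtain ⟨d, hd, rfl⟩ := h
  rw [pv_digitChar_dval d hd]
  omega

-- value of a digit string (the fold inside pvParseDigits on a sign-free string)
def pvVal (u : List Char) : Int := u.foldl (fun a c => 10 * a + ((c.toNat : Int) - 48)) 0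

theorem pvVal_foldl (u : List Char) (a : Int) :
    u.foldl (fun a c => 10 * a + ((c.toNat : Int) - 48)) a = a * 10 ^ u.length + pvVal u := by
  induction u generalizing a with
  | nil => simp [pvVal]
  | cons c u ih =>
    have hR : pvVal (c :: u) = (10 * 0 + ((c.toNat : Int) - 48)) * 10 ^ u.length + pvVal u := by
      unfold pvVal
      simp only [List.foldl_cons]
      exact ih _
    simp only [List.foldl_cons, List.length_cons]
    rw [ih, hR]
    ring

theorem pvVal_cons (c : Char) (u : List Char) :
    pvVal (c :: u) = pvDval c * 10 ^ u.length + pvVal u := by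
  have hR : pvVal (c :: u) = (10 * 0 + ((c.toNat : Int) - 48)) * 10 ^ u.length + pvVal u := by
    unfold pvVal
    simp only [List.foldl_cons]
    exact pvVal_foldl u _
  rw [hR]
  unfold pvDval
  ring

theorem pvVal_append (u w : List Char) :
    pvVal (u ++ w) = pvVal u * 10 ^ w.length + pvVal w := by
  unfold pvVal
  rw [List.foldl_append]
  exact pvVal_foldl w _

theorem pvVal_digits (m : Nat) : pvVal (pvDigits m) = (m : Int) := by
  induction m using Nat.strong_induction_on with
  | _ m ih =>
    by_cases h : m < 10
    · rw [pvDigits_lt m h, pvVal_cons]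
      unfold pvVal
      rw [pv_digitChar_dval m h]
      simp
    · rw [pvDigits_ge m h, pvVal_append, ih (m / 10) (Nat.div_lt_self (by omega) (by norm_num))]
      rw [pvVal_cons]
      rw [pv_digitChar_dval (m % 10) (by omega)]
      show (m / 10 : Int) * 10 ^ 1 + (↑(m % 10) * 10 ^ 0 + pvVal []) = (m : Int)
      have : pvVal [] = 0 := rfl
      rw [this]
      have := Nat.div_add_mod m 10
      push_cast
      omega

theorem pvVal_bounds (u : List Char) (h : ∀ c ∈ u, pvIsDigit c) :
    0 ≤ pvVal u ∧ pvVal u < 10 ^ u.length := by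
  induction u with
  | nil => simp [pvVal]
  | cons c u ih =>
    rw [pvVal_cons]
    obtain ⟨h1, h2⟩ := ih (fun c hc => h c (List.mem_cons_of_mem _ hc))
    obtain ⟨h3, h4⟩ := pv_dval_bounds c (h c List.mem_cons_self)
    constructor
    · positivity
    · simp only [List.length_cons]
      have : (10:Int) ^ (u.length + 1) = 10 * 10 ^ u.length := by ring
      rw [this]
      nlinarith

theorem pvVal_sds (u : List Char) (h : ∀ c ∈ u, pvIsDigit c) :
    (u.map pvDval).sum = ((pvSds (pvVal u).toNat : Nat) : Int) := by
  induction u using List.reverseRecOn with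
  | nil => simp [pvVal, pvSds_zero]
  | append_singleton u c ih =>
    have hu : ∀ x ∈ u, pvIsDigit x := fun x hx => h x (by simp [hx])
    obtain ⟨d, hd, rfl⟩ := h c (by simp)
    have hval := (pvVal_bounds u hu).1
    have hv : pvVal (u ++ [Nat.digitChar d]) = 10 * pvVal u + (d : Int) := by
      rw [pvVal_append, pvVal_cons, pv_digitChar_dval d hd]
      have h0 : pvVal ([] : List Char) = 0 := rfl
      simp only [List.length_nil, List.length_cons, pow_zero, pow_one, h0]
      ring
    rw [List.map_append, List.sum_append, ih hu, hv]
    simp only [List.map_cons, List.map_nil, List.sum_cons, List.sum_nil, pv_digitChar_dval d hd]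
    have ht : (10 * pvVal u + (d : Int)).toNat = 10 * (pvVal u).toNat + d := by omega
    rw [ht, pvSds_ten_mul_add _ _ hd]
    push_cast
    ring

theorem pvDigits_ne_nil (m : Nat) : pvDigits m ≠ [] := by
  by_cases h : m < 10
  · rw [pvDigits_lt m h]; simp
  · rw [pvDigits_ge m h]; simp

theorem pvDigits_len_pos (m : Nat) : 1 ≤ (pvDigits m).length :=
  List.length_pos_iff.mpr (pvDigits_ne_nil m)

theorem pvDigits_upper (m : Nat) : m < 10 ^ (pvDigits m).length := by
  have h := pvVal_digits m
  have hb := (pvVal_bounds (pvDigits m) (pvDigits_digits m)).2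
  rw [h] at hb
  exact_mod_cast hb

theorem pvDigits_lower (m : Nat) (hm : 1 ≤ m) : 10 ^ ((pvDigits m).length - 1) ≤ m := by
  induction m using Nat.strong_induction_on with
  | _ m ih =>
    by_cases h : m < 10
    · rw [pvDigits_lt m h]; simpa using hm
    · rw [pvDigits_ge m h]
      have hq : 1 ≤ m / 10 := by omega
      have := ih (m / 10) (Nat.div_lt_self (by omega) (by norm_num)) hq
      have hL := pvDigits_len_pos (m / 10)
      simp only [List.length_append, List.length_cons, List.length_nil]
      have he : (pvDigits (m / 10)).length + 1 - 1 = ((pvDigits (m / 10)).length - 1) + 1 := by omega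
      rw [he, pow_succ]
      have h10 : 10 * (m / 10) ≤ m := by omega
      nlinarith

-- take/drop of the digit string read back as division/remainder
theorem pvVal_drop (N j : Nat) (hj : j ≤ (pvDigits N).length) :
    pvVal ((pvDigits N).drop j) = ((N % 10 ^ ((pvDigits N).length - j) : Nat) : Int) ∧
    pvVal ((pvDigits N).take j) = ((N / 10 ^ ((pvDigits N).length - j) : Nat) : Int) := by
  set cs := pvDigits N with hcs
  set L := cs.length with hL
  have hsplit : cs = cs.take j ++ cs.drop j := (List.take_append_drop j cs).symm
  have hlen : (cs.drop j).length = L - j := by simp [hL]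
  have hdig : ∀ c ∈ cs, pvIsDigit c := pvDigits_digits N
  have hdigT : ∀ c ∈ cs.take j, pvIsDigit c := fun c hc => hdig c (List.mem_of_mem_take hc)
  have hdigD : ∀ c ∈ cs.drop j, pvIsDigit c := fun c hc => hdig c (List.mem_of_mem_drop hc)
  have hv : (N : Int) = pvVal (cs.take j) * 10 ^ (L - j) + pvVal (cs.drop j) := by
    conv_lhs => rw [← pvVal_digits N, ← hcs, hsplit]
    rw [pvVal_append, hlen]
  obtain ⟨hD0, hD1⟩ := pvVal_bounds (cs.drop j) hdigD
  obtain ⟨hT0, _⟩ := pvVal_bounds (cs.take j) hdigT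
  rw [hlen] at hD1
  set t := (pvVal (cs.take j)).toNat with htn
  set d := (pvVal (cs.drop j)).toNat with hdn
  have ht' : pvVal (cs.take j) = (t : Int) := by omega
  have hd' : pvVal (cs.drop j) = (d : Int) := by omega
  have hdlt : d < 10 ^ (L - j) := by
    have : ((d : Int)) < 10 ^ (L - j) := by rw [← hd']; exact hD1
    exact_mod_cast this
  have hNeq : N = t * 10 ^ (L - j) + d := by
    have : (N : Int) = (t : Int) * 10 ^ (L - j) + (d : Int) := by rw [← ht', ← hd']; exact hv
    exact_mod_cast this
  have hp : 0 < 10 ^ (L - j) := Nat.pow_pos (by norm_num)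
  have hNeq' : N = d + 10 ^ (L - j) * t := by rw [hNeq]; ring
  have hdiv : N / 10 ^ (L - j) = t := by
    rw [hNeq', Nat.add_mul_div_left _ _ hp, Nat.div_eq_of_lt hdlt, Nat.zero_add]
  have hmod : N % 10 ^ (L - j) = d := by
    rw [hNeq', Nat.add_mul_mod_self_left, Nat.mod_eq_of_lt hdlt]
  exact ⟨by rw [hd', hmod], by rw [ht', hdiv]⟩

-- pvParseDigits agrees with pvVal on digit strings
theorem pvParse_eq_val (u : List Char) (h : ∀ c ∈ u, pvIsDigit c) :
    pvParseDigits u = pvVal u := by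
  cases u with
  | nil => rfl
  | cons c u =>
    obtain ⟨d, hd, rfl⟩ := h c List.mem_cons_self
    have h1 : Nat.digitChar d ≠ '-' := by
      intro he
      have := pv_digitChar_toNat d hd
      rw [he] at this
      simp [Char.toNat] at this
      omega
    have h2 : Nat.digitChar d ≠ '+' := by
      intro he
      have := pv_digitChar_toNat d hd
      rw [he] at this
      simp [Char.toNat] at this
      omega
    unfold pvParseDigits pvVal
    split
    · rename_i heq
      exact absurd ((List.cons.injEq _ _ _ _).mp heq).1 h1
    · rfl

-- the threshold exponent: k_A = pvE N s + 1 is the rounding exponent A's first trigger uses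
def pvQ (N : Nat) (s : Int) (e : Nat) : Prop :=
  ((pvSds (N / 10 ^ (e + 1)) : Nat) : Int) < s ∨ N < 10 ^ (e + 1)

def pvQdec (N : Nat) (s : Int) : DecidablePred (pvQ N s) := fun e => by
  unfold pvQ
  infer_instance

theorem pvQ_exists (N : Nat) (s : Int) : ∃ e, pvQ N s e :=
  ⟨N, Or.inr (lt_of_lt_of_le (Nat.lt_pow_self (by norm_num)) (Nat.pow_le_pow_right (by norm_num) (by omega)))⟩

def pvE (N : Nat) (s : Int) : Nat := @Nat.find _ (pvQdec N s) (pvQ_exists N s)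

theorem pvE_spec (N : Nat) (s : Int) : pvQ N s (pvE N s) :=
  @Nat.find_spec _ (pvQdec N s) (pvQ_exists N s)
theorem pvE_min (N : Nat) (s : Int) {e : Nat} (h : e < pvE N s) : ¬ pvQ N s e :=
  @Nat.find_min _ (pvQdec N s) (pvQ_exists N s) _ h

-- E-facts, under 1 ≤ N and s < digit-sum of N
theorem pvE_E1 (N : Nat) (s : Int) (hs : s < ((pvSds N : Nat) : Int)) :
    s ≤ ((pvSds (N / 10 ^ pvE N s) : Nat) : Int) := by
  rcases Nat.eq_zero_or_pos (pvE N s) with h0 | h0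
  · rw [h0]
    simpa using le_of_lt hs
  · have := pvE_min N s (show pvE N s - 1 < pvE N s by omega)
    unfold pvQ at this
    push_neg at this
    have he : pvE N s - 1 + 1 = pvE N s := by omega
    rw [he] at this
    exact this.1

theorem pvE_E2 (N : Nat) (s : Int) (hN : 1 ≤ N) : 10 ^ pvE N s ≤ N := by
  rcases Nat.eq_zero_or_pos (pvE N s) with h0 | h0
  · rw [h0]; simpa using hN
  · have := pvE_min N s (show pvE N s - 1 < pvE N s by omega)
    unfold pvQ at this
    push_neg at this
    have he : pvE N s - 1 + 1 = pvE N s := by omega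
    rw [he] at this
    exact this.2

theorem pvE_lt_len (N : Nat) (s : Int) (hN : 1 ≤ N) : pvE N s < (pvDigits N).length := by
  have h1 := pvE_E2 N s hN
  have h2 := pvDigits_upper N
  by_contra h
  push_neg at h
  have : 10 ^ (pvDigits N).length ≤ 10 ^ pvE N s := Nat.pow_le_pow_right (by norm_num) h
  omega

theorem pvE_E3 (N : Nat) (s : Int) (hN : 1 ≤ N) {e : Nat}
    (h1 : pvE N s < e) (h2 : e < (pvDigits N).length) :
    ((pvSds (N / 10 ^ e) : Nat) : Int) < s := by
  rcases pvE_spec N s with hq | hq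
  · calc ((pvSds (N / 10 ^ e) : Nat) : Int) ≤ ((pvSds (N / 10 ^ (pvE N s + 1)) : Nat) : Int) := by
          exact_mod_cast pvSds_div_le_div N (pvE N s + 1) e (by omega)
      _ < s := hq
  · exfalso
    have hlow := pvDigits_lower N hN
    have : 10 ^ (pvE N s + 1) ≤ 10 ^ ((pvDigits N).length - 1) :=
      Nat.pow_le_pow_right (by norm_num) (by omega)
    omega

-- A's scan, restated structurally on the suffix of the digit string (v = digit sum so far)
def pvAnsSpec (s : Int) : List Char → Int → Int
  | [], _ => 0
  | c :: u, v =>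
    if s ≤ v + pvDval c then 10 ^ (u.length + 1) - pvVal (c :: u)
    else pvAnsSpec s u (v + pvDval c)

theorem pvAnsSpec_zero (s : Int) (u : List Char) (v : Int) (h : ∀ c ∈ u, pvIsDigit c)
    (hlt : v + (u.map pvDval).sum < s) : pvAnsSpec s u v = 0 := by
  revert v h hlt
  induction u with
  | nil => intro v h hlt; rfl
  | cons c u ih =>
    intro v h hlt
    have hc := pv_dval_bounds c (h c List.mem_cons_self)
    have hsum : 0 ≤ ((u.map pvDval).sum) := by
      apply List.sum_nonneg
      intro x hx
      obtain ⟨y, hy, rfl⟩ := List.mem_map.mp hx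
      exact (pv_dval_bounds y (h y (List.mem_cons_of_mem _ hy))).1
    simp only [List.map_cons, List.sum_cons] at hlt
    unfold pvAnsSpec
    rw [if_neg (by omega)]
    exact ih _ (fun x hx => h x (List.mem_cons_of_mem _ hx)) (by omega)

-- bridge: A's indexed pyRange fold equals the structural scan on the suffix
theorem pvFoldA_bridge (N : Nat) (s : Int) :
    ∀ (fl j : Nat) (st : Int × Int), j ≤ (pvDigits N).length → fl = (pvDigits N).length - j →
    ((PySem.List.pyRange (j : Int) ((pvDigits N).length : Int) 1).foldl (fun (st : Int × Int) i =>
      (st.1 + (((PySem.Str.pyGet? (PySem.Int.toStr (N : Int)) i).getD '0').toNat : Int) - 48,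
        if s ≤ st.1 + (((PySem.Str.pyGet? (PySem.Int.toStr (N : Int)) i).getD '0').toNat : Int) - 48
            ∧ st.2 = 0 then
          10 ^ ((((pvDigits N).length : Int)) - i).toNat -
            pvParseDigits (PySem.Str.slice (PySem.Int.toStr (N : Int)) (some i) none).toList
        else st.2)) st) =
    (st.1 + (((pvDigits N).drop j).map pvDval).sum,
      if st.2 = 0 then pvAnsSpec s ((pvDigits N).drop j) st.1 else st.2) := by
  intro fl
  induction fl with
  | zero =>
    intro j st hj hfl
    have hj' : j = (pvDigits N).length := by omega
    subst hj'
    obtain ⟨v0, a0⟩ := st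
    rw [show PySem.List.pyRange ((pvDigits N).length : Int) ((pvDigits N).length : Int) 1 = [] by
      rw [PySem.List.pyRange_one]; simp]
    simp only [List.foldl_nil, List.drop_length, List.map_nil, List.sum_nil, add_zero]
    rcases eq_or_ne a0 0 with h | h
    · rw [if_pos h, h]
      rfl
    · rw [if_neg h]
  | succ fl ih =>
    intro j st hj hfl
    set cs := pvDigits N with hcs
    set L := cs.length with hL
    have hjL : j < L := by omega
    have hts : (PySem.Int.toStr (N : Int)).toList = cs := by
      rw [PySem.Int.toList_toStr, pv_toChars]
    have hdropc : cs.drop j = cs[j] :: cs.drop (j + 1) := List.drop_eq_getElem_cons hjL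
    have hget : (PySem.Str.pyGet? (PySem.Int.toStr (N : Int)) ((j : Nat) : Int)).getD '0' = cs[j] := by
      rw [PySem.Str.pyGet?_natCast, hts]
      rw [List.getElem?_eq_getElem hjL]
      rfl
    have hslice : (PySem.Str.slice (PySem.Int.toStr (N : Int)) (some ((j : Nat) : Int)) none).toList
        = cs.drop j := by
      rw [PySem.Str.toList_slice, PySem.Chars.slice_eq_listSlice, hts,
        PySem.List.slice_from_natCast]
    have hparse : pvParseDigits (cs.drop j) = pvVal (cs.drop j) :=
      pvParse_eq_val _ (fun c hc => pvDigits_digits N c (List.mem_of_mem_drop hc))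
    have hexp : (((L : Nat) : Int) - ((j : Nat) : Int)).toNat = L - j := by omega
    have hlen_drop : (cs.drop j).length = L - j := by simp [hL]
    have hlen_drop1 : (cs.drop (j + 1)).length = L - (j + 1) := by simp [hL]
    have hdvj : pvDval cs[j] = ((cs[j].toNat : Int)) - 48 := rfl
    have hSum2 : ((cs.drop j).map pvDval).sum
        = (((cs[j].toNat : Int)) - 48) + ((cs.drop (j + 1)).map pvDval).sum := by
      rw [hdropc]
      simp only [List.map_cons, List.sum_cons, hdvj]
    have hBIGne : (10 : Int) ^ (L - j) - pvVal (cs.drop j) ≠ 0 := by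
      have hb := pvVal_bounds (cs.drop j)
        (fun c hc => pvDigits_digits N c (List.mem_of_mem_drop hc))
      rw [hlen_drop] at hb
      omega
    have hAns : pvAnsSpec s (cs.drop j) st.1
        = if s ≤ st.1 + ((cs[j].toNat : Int)) - 48 then (10 : Int) ^ (L - j) - pvVal (cs.drop j)
          else pvAnsSpec s (cs.drop (j + 1)) (st.1 + ((cs[j].toNat : Int)) - 48) := by
      conv_lhs => rw [hdropc]
      simp only [pvAnsSpec]
      rw [← hdropc, hlen_drop1, hdvj]
      rw [show L - (j + 1) + 1 = L - j by omega]
      simp only [show st.1 + (((cs[j].toNat : Int)) - 48) = st.1 + ((cs[j].toNat : Int)) - 48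
        by ring]
    rw [PySem.List.pyRange_one_cons (by exact_mod_cast hjL),
      show ((j : Nat) : Int) + 1 = (((j + 1 : Nat)) : Int) by push_cast; ring,
      List.foldl_cons, ih (j + 1) _ (by omega) (by omega)]
    simp only [hget, hslice, hparse, hexp]
    by_cases h2 : st.2 = 0
    · by_cases htr : s ≤ st.1 + ((cs[j].toNat : Int)) - 48
      · rw [if_pos (show (s ≤ st.1 + ((cs[j].toNat : Int)) - 48 ∧ st.2 = 0) from ⟨htr, h2⟩)]
        rw [if_neg hBIGne, if_pos h2, hAns, if_pos htr, Prod.mk.injEq]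
        exact ⟨by rw [hSum2]; ring, rfl⟩
      · rw [if_neg (show ¬ (s ≤ st.1 + ((cs[j].toNat : Int)) - 48 ∧ st.2 = 0) from
          fun hc => htr hc.1)]
        rw [if_pos h2, if_pos h2, hAns, if_neg htr, Prod.mk.injEq]
        exact ⟨by rw [hSum2]; ring, rfl⟩
    · rw [if_neg (show ¬ (s ≤ st.1 + ((cs[j].toNat : Int)) - 48 ∧ st.2 = 0) from
        fun hc => h2 hc.2)]
      rw [if_neg h2, if_neg h2, Prod.mk.injEq]
      exact ⟨by rw [hSum2]; ring, rfl⟩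

theorem pv_digits_sum (N : Nat) : (((pvDigits N).map pvDval).sum) = ((pvSds N : Nat) : Int) := by
  rw [pvVal_sds _ (pvDigits_digits N), pvVal_digits]
  simp

theorem pvA_closed (N : Nat) (s : Int) :
    decrease_the_sum_of_digits (N : Int) s =
      (if ((pvSds N : Nat) : Int) = s then 0 else pvAnsSpec s (pvDigits N) 0) := by
  unfold decrease_the_sum_of_digits
  simp only [PySem.Str.len_eq, PySem.Int.toList_toStr, pv_toChars]
  have hb := pvFoldA_bridge N s ((pvDigits N).length) 0 (0, 0) (by omega) (by omega)
  simp only [Nat.cast_zero] at hb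
  rw [hb]
  simp only [List.drop_zero, zero_add, pv_digits_sum, if_true]

theorem pvDsum_natCast (N : Nat) : pvDsum (N : Int) = ((pvSds N : Nat) : Int) := by
  induction N using Nat.strong_induction_on with
  | _ N ih =>
    rcases Nat.eq_zero_or_pos N with h0 | h0
    · rw [h0]
      rw [pvDsum]
      simp [pvSds_zero]
    · rw [pvDsum]
      rw [dif_pos (by exact_mod_cast h0)]
      rw [show ((10 : Int)) = ((10 : Nat) : Int) by norm_num]
      rw [PySem.Int.mod_natCast, PySem.Int.floordiv_natCast]
      rw [ih (N / 10) (Nat.div_lt_self h0 (by norm_num))]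
      rw [pvSds_pos N (by omega)]
      push_cast
      ring

theorem pvE_le (N : Nat) (s : Int) {e : Nat} (h : pvQ N s e) : pvE N s ≤ e := by
  unfold pvE
  exact @Nat.find_le _ _ (pvQdec N s) (pvQ_exists N s) h

theorem pv_take_sum (N j : Nat) (hjL : j < (pvDigits N).length) :
    (((pvDigits N).take j).map pvDval).sum + pvDval (pvDigits N)[j]
      = ((pvSds (N / 10 ^ ((pvDigits N).length - (j + 1))) : Nat) : Int) := by
  have htake1 : (pvDigits N).take (j + 1) = (pvDigits N).take j ++ [(pvDigits N)[j]] := by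
    rw [List.take_add_one, List.getElem?_eq_getElem hjL]
    rfl
  have h1 : ((((pvDigits N).take (j + 1)).map pvDval).sum)
      = ((pvSds (pvVal ((pvDigits N).take (j + 1))).toNat : Nat) : Int) :=
    pvVal_sds _ (fun c hc => pvDigits_digits N c (List.mem_of_mem_take hc))
  have h2 := (pvVal_drop N (j + 1) (by omega)).2
  rw [h2] at h1
  rw [htake1] at h1
  simp only [List.map_append, List.sum_append, List.map_cons, List.map_nil,
    List.sum_cons, List.sum_nil, add_zero, Int.toNat_natCast] at h1
  exact h1

theorem pvAnsSpec_main (N : Nat) (s : Int) (hN : 1 ≤ N) (hs : s < ((pvSds N : Nat) : Int)) :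
    ∀ (d j : Nat), j ≤ (pvDigits N).length - 1 - pvE N s →
      d = (pvDigits N).length - 1 - pvE N s - j →
    pvAnsSpec s ((pvDigits N).drop j) ((((pvDigits N).take j).map pvDval).sum)
      = 10 ^ (pvE N s + 1) - ((N % 10 ^ (pvE N s + 1) : Nat) : Int) := by
  intro d
  induction d with
  | zero =>
    intro j hj hd
    have hE := pvE_lt_len N s hN
    have hLpos := pvDigits_len_pos N
    have hj' : j = (pvDigits N).length - 1 - pvE N s := by omega
    have hjL : j < (pvDigits N).length := by omega
    have hdropc : (pvDigits N).drop j = (pvDigits N)[j] :: (pvDigits N).drop (j + 1) :=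
      List.drop_eq_getElem_cons hjL
    have hts := pv_take_sum N j hjL
    have hexp : (pvDigits N).length - (j + 1) = pvE N s := by omega
    rw [hexp] at hts
    rw [hdropc]
    simp only [pvAnsSpec]
    rw [if_pos (by rw [hts]; exact pvE_E1 N s hs)]
    have hld : ((pvDigits N).drop (j + 1)).length = (pvDigits N).length - (j + 1) := by simp
    rw [← hdropc]
    have hval := (pvVal_drop N j (by omega)).1
    rw [hld, show (pvDigits N).length - (j + 1) + 1 = pvE N s + 1 by omega, hval,
      show (pvDigits N).length - j = pvE N s + 1 by omega]
  | succ d ih =>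
    intro j hj hd
    have hE := pvE_lt_len N s hN
    have hLpos := pvDigits_len_pos N
    have hjlt : j < (pvDigits N).length - 1 - pvE N s := by omega
    have hjL : j < (pvDigits N).length := by omega
    have hdropc : (pvDigits N).drop j = (pvDigits N)[j] :: (pvDigits N).drop (j + 1) :=
      List.drop_eq_getElem_cons hjL
    have hts := pv_take_sum N j hjL
    have htake1 : (pvDigits N).take (j + 1) = (pvDigits N).take j ++ [(pvDigits N)[j]] := by
      rw [List.take_add_one, List.getElem?_eq_getElem hjL]
      rfl
    rw [hdropc]
    simp only [pvAnsSpec]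
    rw [if_neg (by
      rw [hts]
      have h3 := pvE_E3 N s hN (show pvE N s < (pvDigits N).length - (j + 1) by omega)
        (show (pvDigits N).length - (j + 1) < (pvDigits N).length by omega)
      omega)]
    have hsum : ((((pvDigits N).take j).map pvDval).sum) + pvDval (pvDigits N)[j]
        = ((((pvDigits N).take (j + 1)).map pvDval).sum) := by
      rw [htake1, List.map_append, List.sum_append]
      simp
    rw [hsum]
    exact ih (j + 1) (by omega) (by omega)

-- B's loop: starting from p = 10^k with every smaller exponent ruled out or equal in value
theorem pvLoop_main (N : Nat) (s : Int) (hN : 1 ≤ N) (hs : s < ((pvSds N : Nat) : Int)) :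
    ∀ (fuel k : Nat), 1 ≤ k → k ≤ pvE N s + 1 → 10 ^ (k - 1) ≤ N → pvE N s + 1 < k + fuel →
    pvLoop (N : Int) s ((10 ^ k : Nat) : Int) fuel = ((pvM N (pvE N s + 1) : Nat) : Int) - (N : Int) := by
  intro fuel
  induction fuel with
  | zero => intro k h1 h2 h3 h4; omega
  | succ fuel ih =>
    intro k h1 h2 h3 h4
    simp only [pvLoop]
    by_cases hp : ((10 ^ k : Nat) : Int) ≤ (N : Int)
    · rw [if_pos hp]
      have hpN : 10 ^ k ≤ N := by exact_mod_cast hp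
      have hm : (PySem.Int.floordiv (N : Int) ((10 ^ k : Nat) : Int) + 1) * ((10 ^ k : Nat) : Int)
          = ((pvM N k : Nat) : Int) := by
        rw [PySem.Int.floordiv_natCast]
        unfold pvM
        push_cast
        ring
      rw [hm, pvDsum_natCast]
      by_cases hds : ((pvSds (pvM N k) : Nat) : Int) ≤ s
      · rw [if_pos hds]
        rcases Nat.eq_or_lt_of_le h2 with hke | hke
        · rw [hke]
        · have hkle : k ≤ (pvE N s) := by omega
          obtain ⟨t, hinc1, hinc2⟩ := pvSds_inc (N / 10 ^ k)
          have hdd : N / 10 ^ k / 10 ^ t = N / 10 ^ (k + t) := by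
            rw [Nat.div_div_eq_div_mul, ← pow_add]
          have hmk : pvM N k = pvM N (k + t) := by
            unfold pvM
            rw [hinc2, hdd, pow_add]
            ring
          have hsds : pvSds (pvM N k) = pvSds (N / 10 ^ (k + t)) + 1 := by
            unfold pvM
            rw [pvSds_mul_pow, hinc1, hdd]
          rcases le_or_gt ((pvE N s) + 1) (k + t) with hsq | hsq
          · have hle1 : pvM N k ≤ pvM N ((pvE N s) + 1) := pvM_mono N (by omega)
            have hle2 : pvM N ((pvE N s) + 1) ≤ pvM N (k + t) := pvM_mono N hsq
            rw [← hmk] at hle2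
            have : pvM N k = pvM N ((pvE N s) + 1) := le_antisymm hle1 hle2
            rw [this]
          · exfalso
            have hge : pvSds (N / 10 ^ (pvE N s)) ≤ pvSds (N / 10 ^ (k + t)) :=
              pvSds_div_le_div N (k + t) (pvE N s) (by omega)
            have hE1 := pvE_E1 N s hs
            rw [hsds] at hds
            push_cast at hds
            have : ((pvSds (N / 10 ^ (k + t)) : Nat) : Int) ≥ ((pvSds (N / 10 ^ (pvE N s)) : Nat) : Int) := by
              exact_mod_cast hge
            omega
      · rw [if_neg hds]
        have hkne : k ≠ pvE N s + 1 := by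
          intro hke
          apply hds
          subst hke
          rcases pvE_spec N s with hq | hq
          · have h5 : pvSds (pvM N (pvE N s + 1)) = pvSds (N / 10 ^ (pvE N s + 1) + 1) := by
              unfold pvM
              rw [pvSds_mul_pow]
            have h6 := pvSds_succ_le (N / 10 ^ (pvE N s + 1))
            rw [h5]
            have h7 : ((pvSds (N / 10 ^ (pvE N s + 1) + 1) : Nat) : Int)
                ≤ ((pvSds (N / 10 ^ (pvE N s + 1)) : Nat) : Int) + 1 := by exact_mod_cast h6
            omega
          · omega
        have hnext : ((10 ^ k : Nat) : Int) * 10 = ((10 ^ (k + 1) : Nat) : Int) := by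
          push_cast
          ring
        rw [hnext]
        exact ih (k + 1) (by omega) (by omega) (by simpa using hpN) (by omega)
    · rw [if_neg hp]
      have hpN : N < 10 ^ k := by
        have : (N : Int) < ((10 ^ k : Nat) : Int) := by omega
        exact_mod_cast this
      have hfind : (pvE N s) ≤ k - 1 := pvE_le N s (by
        unfold pvQ
        right
        rw [show k - 1 + 1 = k by omega]
        exact hpN)
      have hke : k = (pvE N s) + 1 := by omega
      have hdiv0 : N / 10 ^ ((pvE N s) + 1) = 0 := Nat.div_eq_of_lt (by rw [← hke]; exact hpN)
      unfold pvM
      rw [hdiv0, hke]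
      push_cast
      ring

theorem pv_main (n s : Int) (hPre : 0 ≤ n) :
    decrease_the_sum_of_digits n s = decrease_the_sum_of_digits_alt n s := by
  obtain ⟨N, rfl⟩ : ∃ N : Nat, n = (N : Int) := ⟨n.toNat, (Int.toNat_of_nonneg hPre).symm⟩
  unfold decrease_the_sum_of_digits_alt
  rw [pvDsum_natCast, pvA_closed]
  rcases le_or_gt ((pvSds N : Nat) : Int) s with hle | hgt
  · rw [if_pos hle]
    rcases eq_or_lt_of_le hle with heq | hlt
    · rw [if_pos heq]
    · rw [if_neg (by omega)]
      exact pvAnsSpec_zero s (pvDigits N) 0 (pvDigits_digits N) (by rw [pv_digits_sum]; omega)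
  · rw [if_neg (by omega), if_neg (by omega)]
    rw [Int.toNat_natCast]
    rcases Nat.eq_zero_or_pos N with h0 | h0
    · subst h0
      have hs0 : s < 0 := by
        have : pvSds 0 = 0 := pvSds_zero
        rw [this] at hgt
        exact_mod_cast hgt
      have hdig0 : pvDigits 0 = ['0'] := by rw [pvDigits_lt 0 (by norm_num)]; rfl
      rw [hdig0]
      simp only [pvAnsSpec]
      rw [if_pos (by
        have hz : pvDval '0' = 0 := rfl
        rw [hz]
        omega)]
      simp only [pvLoop]
      rw [if_neg (by simp)]
      have hv0 : pvVal ['0'] = 0 := rfl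
      rw [hv0]
      norm_num
    · have hb := pvLoop_main N s h0 hgt (N + 1) 1 (by norm_num) (by omega) (by simpa using h0) (by
        have h2 := pvE_E2 N s h0
        have h3 : pvE N s < 10 ^ (pvE N s) := Nat.lt_pow_self (by norm_num)
        omega)
      rw [show ((10 : Int)) = ((10 ^ 1 : Nat) : Int) by norm_num, hb]
      have hA := pvAnsSpec_main N s h0 hgt ((pvDigits N).length - 1 - pvE N s) 0 (by omega) (by omega)
      simp only [List.drop_zero, List.take_zero, List.map_nil, List.sum_nil] at hA
      rw [hA]
      have hdm := Nat.div_add_mod N (10 ^ (pvE N s + 1))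
      have hdm' : N / 10 ^ (pvE N s + 1) * 10 ^ (pvE N s + 1) + N % 10 ^ (pvE N s + 1) = N := by
        rw [Nat.mul_comm] at hdm
        exact hdm
      have hdmI : ((N / 10 ^ (pvE N s + 1) : Nat) : Int) * (10 : Int) ^ (pvE N s + 1)
          + ((N % 10 ^ (pvE N s + 1) : Nat) : Int) = (N : Int) := by exact_mod_cast hdm'
      unfold pvM
      have hc1 : (((N / 10 ^ (pvE N s + 1) + 1) * 10 ^ (pvE N s + 1) : Nat) : Int)
          = ((N / 10 ^ (pvE N s + 1) : Nat) : Int) * (10 : Int) ^ (pvE N s + 1)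
            + (10 : Int) ^ (pvE N s + 1) := by
        push_cast
        ring
      rw [hc1]
      linarith [hdmI]

-- ===== VERDICT (by name: the statement is the Claim_ definition above) =====
theorem decrease_the_sum_of_digits_spec : Claim_equal_decrease_the_sum_of_digits := by
  intro n s hDom hPre
  exact pv_main n s hPre
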